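-- pv_equiv track=rewrite | github.com/senium-Cyber/Docker_analyzer | dockerfile_analyzer/app/main.py | merge_dependencies
-- ===== SOURCE A (Python) =====
-- def merge_dependencies(dependencies):
--     """合并依赖项，保留相同包名的最新版本"""
--     dep_dict = {}
--     for dep in dependencies:
--         if "==" in dep:
--             name, version = dep.split("==")
--         elif ":" in dep:
--             name, version = dep.split(":")
--         elif "@" in dep:
--             name, version = dep.split("@")
--         else:
--             name, version = dep, None
--
--         if name in dep_dict:
--             if version and (dep_dict[name] is None or version > dep_dict[name]):
--                 dep_dict[name] = version
--         else:
--             dep_dict[name] = version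
--
--     return [f"{name}=={version}" if version else name for name, version in dep_dict.items()]
-- ===== SOURCE B (Python) =====
-- def merge_dependencies(dependencies):
--     """Group versions per name first, then reduce each group to the max truthy version."""
--     groups = {}
--     for dep in dependencies:
--         if "==" in dep:
--             name, version = dep.split("==")
--         elif ":" in dep:
--             name, version = dep.split(":")
--         elif "@" in dep:
--             name, version = dep.split("@")
--         else:
--             name, version = dep, None
--         groups.setdefault(name, []).append(version)
--
--     result = []
--     for name, versions in groups.items():
--         truthy = [v for v in versions if v]
--         result.append(f"{name}=={max(truthy)}" if truthy else name)
--     return result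
-- ===== Notes on version B (the rewrite author's own statement) =====
-- stated objective: alternative
-- what changed: Instead of keeping a single running best version per name updated under a truthiness/comparison guard, B groups all parsed versions per name in one pass and then reduces each group with a plain max over the truthy versions (or keeps the bare name when there is none).
import Mathlib
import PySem

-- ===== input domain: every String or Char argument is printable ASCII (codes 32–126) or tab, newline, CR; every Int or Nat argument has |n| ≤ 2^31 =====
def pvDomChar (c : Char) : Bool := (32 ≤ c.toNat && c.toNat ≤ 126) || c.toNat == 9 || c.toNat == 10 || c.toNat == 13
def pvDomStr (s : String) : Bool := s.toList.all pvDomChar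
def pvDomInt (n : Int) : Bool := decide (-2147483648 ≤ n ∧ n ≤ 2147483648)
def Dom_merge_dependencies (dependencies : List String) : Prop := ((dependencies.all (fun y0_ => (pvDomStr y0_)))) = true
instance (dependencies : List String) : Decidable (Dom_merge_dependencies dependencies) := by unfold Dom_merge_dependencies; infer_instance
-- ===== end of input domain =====

-- B changes the decomposition: one grouping pass collecting every parsed version per name,
-- then a plain max over the truthy versions of each group (objective: alternative, not faster).

-- ===== PORT A =====
-- shared parsing helper: the identical split cascade of both Pythons.
-- On a dep whose chosen separator splits into ≠ 2 parts Python raises ValueError (excluded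
-- by Pre_); there unpack2 falls back to (dep, none) in both ports.
def unpack2 (parts : List String) (dep : String) : String × Option String :=
  match parts with
  | [n, v] => (n, some v)
  | _ => (dep, none)

def parseDep (dep : String) : String × Option String :=
  if PySem.Str.isIn "==" dep then unpack2 ((PySem.Str.split? dep "==").getD []) dep
  else if PySem.Str.isIn ":" dep then unpack2 ((PySem.Str.split? dep ":").getD []) dep
  else if PySem.Str.isIn "@" dep then unpack2 ((PySem.Str.split? dep "@").getD []) dep
  else (dep, none)

-- `version and (dep_dict[name] is None or version > dep_dict[name])`
def betterVer (cur : Option String) (v : Option String) : Bool :=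
  match v with
  | none => false
  | some s => if s = "" then false else
      match cur with
      | none => true
      | some c => decide (c < s)

-- f"{name}=={version}" if version else name
def fmtDep (name : String) (v : Option String) : String :=
  match v with
  | none => name
  | some s => if s = "" then name else name ++ "==" ++ s

def merge_dependencies (dependencies : List String) : List String :=
  let dep_dict : PySem.Dict String (Option String) :=
    dependencies.foldl (fun d dep =>
      let p := parseDep dep
      if d.contains p.1 then
        if betterVer (d.getD p.1 none) p.2 then d.insert p.1 p.2 else d
      else d.insert p.1 p.2) PySem.Dict.empty
  dep_dict.items.map (fun q => fmtDep q.1 q.2)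

-- ===== PORT B =====
-- [v for v in versions if v]
def truthy1 (v : Option String) : List String :=
  match v with
  | none => []
  | some s => if s = "" then [] else [s]

def merge_dependencies_alt (dependencies : List String) : List String :=
  let groups : PySem.Dict String (List (Option String)) :=
    dependencies.foldl (fun d dep =>
      let p := parseDep dep
      d.modify p.1 [] (fun l => l ++ [p.2])) PySem.Dict.empty
  groups.items.map (fun q =>
    let t := q.2.flatMap truthy1
    match PySem.List.max? t (fun y => y) with
    | some m => q.1 ++ "==" ++ m
    | none => q.1)

-- ===== PRECONDITION & SPEC =====
-- Pre_ excludes exactly the deps on which Python raises ValueError: the first separator of the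
-- cascade that occurs in the string occurs more than once, so the 2-variable unpacking fails
-- (B raises identically there; nothing else is excluded).
def Pre_merge_dependencies (dependencies : List String) : Prop :=
  ∀ dep ∈ dependencies,
    (PySem.Str.isIn "==" dep = true → PySem.Str.count dep "==" = 1) ∧
    (PySem.Str.isIn "==" dep = false → PySem.Str.isIn ":" dep = true → PySem.Str.count dep ":" = 1) ∧
    (PySem.Str.isIn "==" dep = false → PySem.Str.isIn ":" dep = false →
      PySem.Str.isIn "@" dep = true → PySem.Str.count dep "@" = 1)
instance (dependencies : List String) : Decidable (Pre_merge_dependencies dependencies) := by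
  unfold Pre_merge_dependencies; infer_instance

def pvWitness_merge_dependencies : List String := ["pkg==1.2", "pkg==1.10", "lib:2", "tool@3", "bare", "pkg=="]

def Spec_merge_dependencies (dependencies : List String) (out : List String) : Prop := out = merge_dependencies_alt dependencies
instance (dependencies : List String) (out : List String) : Decidable (Spec_merge_dependencies dependencies out) := by unfold Spec_merge_dependencies; infer_instance

-- ===== CLAIM (what is proved, stated in full; the proofs are below) =====
def Claim_equal_merge_dependencies : Prop := ∀ (dependencies : List String), Dom_merge_dependencies dependencies → Pre_merge_dependencies dependencies → Spec_merge_dependencies dependencies (merge_dependencies dependencies)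

-- ===== LEMMAS AND PROOFS =====

-- A's per-key combine step (what one loop iteration does to an already-stored value)
def combineVer (c : Option String) (v : Option String) : Option String :=
  if betterVer c v then v else c

-- A's step expressed on the parsed pair
def stepA (d : PySem.Dict String (Option String)) (p : String × Option String) :
    PySem.Dict String (Option String) :=
  if d.contains p.1 then
    if betterVer (d.getD p.1 none) p.2 then d.insert p.1 p.2 else d
  else d.insert p.1 p.2

theorem keys_stepA (d : PySem.Dict String (Option String)) (p : String × Option String) :
    (stepA d p).keys = PySem.Set.add d.keys p.1 := by
  unfold stepA
  by_cases hc : d.contains p.1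
  · have hm : p.1 ∈ d.keys := (PySem.Dict.contains_iff_mem_keys d p.1).mp hc
    rw [PySem.Set.add_of_mem hm]
    simp only [hc, if_true]
    by_cases hb : betterVer (d.getD p.1 none) p.2
    · simp [hb, PySem.Dict.keys_insert_of_contains d p.2 hc]
    · simp [hb]
  · have hm : p.1 ∉ d.keys := fun h => hc ((PySem.Dict.contains_iff_mem_keys d p.1).mpr h)
    rw [PySem.Set.add_of_not_mem hm]
    simp only [Bool.not_eq_true] at hc
    simp [hc, PySem.Dict.keys_insert_of_not_contains d p.2 hc]

theorem keys_foldA (pairs : List (String × Option String))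
    (d : PySem.Dict String (Option String)) :
    (pairs.foldl stepA d).keys = PySem.Set.update d.keys (pairs.map (·.1)) := by
  induction pairs generalizing d with
  | nil => simp [PySem.Set.update_nil]
  | cons p t ih =>
      simp only [List.foldl_cons, List.map_cons]
      rw [ih, PySem.Set.update_cons, keys_stepA]

theorem get?_stepA_ne (d : PySem.Dict String (Option String)) (p : String × Option String)
    (k : String) (h : p.1 ≠ k) : (stepA d p).get? k = d.get? k := by
  unfold stepA
  by_cases hc : d.contains p.1 <;> by_cases hb : betterVer (d.getD p.1 none) p.2 <;>
    simp [hc, hb, PySem.Dict.get?_insert_of_ne d p.2 (Ne.symm h)]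

theorem get?_stepA_self (d : PySem.Dict String (Option String)) (p : String × Option String) :
    (stepA d p).get? p.1 =
      some (match d.get? p.1 with | none => p.2 | some c => combineVer c p.2) := by
  unfold stepA combineVer
  rcases hg : d.get? p.1 with _ | c
  · have hc : d.contains p.1 = false := by
      rw [PySem.Dict.contains_eq_isSome_get?, hg]; rfl
    simp [hc, PySem.Dict.get?_insert_self]
  · have hc : d.contains p.1 = true := by
      rw [PySem.Dict.contains_eq_isSome_get?, hg]; rfl
    have hgd : d.getD p.1 none = c := PySem.Dict.getD_of_get?_eq_some d none hg
    simp only [hc, if_true, hgd]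
    by_cases hb : betterVer c p.2
    · simp [hb, PySem.Dict.get?_insert_self]
    · simp [hb, hg]

theorem get?_foldA (pairs : List (String × Option String))
    (d : PySem.Dict String (Option String)) (k : String) :
    (pairs.foldl stepA d).get? k =
      ((pairs.filter (fun p => p.1 == k)).map (·.2)).foldl
        (fun acc v => some (match acc with | none => v | some c => combineVer c v))
        (d.get? k) := by
  induction pairs generalizing d with
  | nil => simp
  | cons p t ih =>
      simp only [List.foldl_cons, List.filter_cons]
      by_cases h : p.1 = k
      · simp only [h, beq_self_eq_true, if_true, List.map_cons, List.foldl_cons]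
        rw [ih, ← h, get?_stepA_self]
      · have hb : (p.1 == k) = false := beq_eq_false_iff_ne.mpr h
        rw [hb]
        simp only [Bool.false_eq_true, if_false]
        rw [ih, get?_stepA_ne d p k h]

-- lifting: once the accumulator is `some`, the fold is the plain combineVer fold
theorem foldA_some (ws : List (Option String)) (c : Option String) :
    ws.foldl (fun acc v => some (match acc with | none => v | some c => combineVer c v))
      (some c) = some (ws.foldl combineVer c) := by
  induction ws generalizing c with
  | nil => rfl
  | cons w t ih => simp only [List.foldl_cons]; exact ih (combineVer c w)

theorem empty_string_lt (s : String) (hs : s ≠ "") : "" < s := by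
  rw [String.lt_iff_toList_lt]
  rcases h : s.toList with _ | ⟨c, t⟩
  · exact absurd (String.toList_inj.mp (by simp [h])) hs
  · simp only [String.toList_empty]
    exact List.Lex.nil

theorem empty_string_le (s : String) : "" ≤ s := by
  by_cases hs : s = ""
  · simp [hs]
  · exact le_of_lt (empty_string_lt s hs)

-- the running-max invariant of A's combine, phrased through the truthy versions
theorem combineVer_charac (ws : List (Option String)) (c : Option String) :
    ws.foldl combineVer c =
      match (c :: ws).flatMap truthy1 with
      | [] => c
      | h :: t => some (t.foldl max h) := by
  induction ws generalizing c with
  | nil =>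
      rcases c with _ | s
      · rfl
      · by_cases hs : s = "" <;> simp [truthy1, hs]
  | cons v t ih =>
      simp only [List.foldl_cons]
      rw [ih (combineVer c v)]
      -- compare the heads: truthy1 (combineVer c v) ++ _  vs  truthy1 c ++ truthy1 v ++ _
      rcases v with _ | s
      · simp [combineVer, betterVer, truthy1]
      · by_cases hs : s = ""
        · simp [combineVer, betterVer, truthy1, hs]
        · rcases c with _ | cs
          · simp [combineVer, betterVer, truthy1, hs]
          · by_cases hcs : cs = ""
            · have h0 : ([] : List Char) < s.toList := by
                simpa using String.lt_iff_toList_lt.mp (empty_string_lt s hs)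
              simp [combineVer, betterVer, truthy1, hs, hcs, h0]
            · by_cases hlt : cs < s
              · have hmax : max cs s = s := max_eq_right (le_of_lt hlt)
                simp only [combineVer, betterVer, hs, hlt, decide_true]
                simp [truthy1, hs, hcs, List.foldl_cons, hmax]
              · have hle : s ≤ cs := le_of_not_gt hlt
                have hmax : max cs s = cs := max_eq_left hle
                simp only [combineVer, betterVer, hs, hlt, decide_false, Bool.false_eq_true,
                  if_false]
                simp [truthy1, hs, hcs, List.foldl_cons, hmax]

-- keys of B's grouping fold
def stepB (d : PySem.Dict String (List (Option String))) (p : String × Option String) :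
    PySem.Dict String (List (Option String)) :=
  d.modify p.1 [] (fun l => l ++ [p.2])

theorem foldl_max_ne_empty (h : String) (t : List String) (hh : h ≠ "") :
    t.foldl max h ≠ "" := by
  intro he
  have := (PySem.List.le_foldl_max t h).1
  rw [he] at this
  exact hh (le_antisymm this (empty_string_le h))

-- ===== VERDICT (by name: the statement is the Claim_ definition above) =====
theorem merge_dependencies_spec : Claim_equal_merge_dependencies := by
  intro deps _ _
  unfold Spec_merge_dependencies merge_dependencies merge_dependencies_alt
  -- both loops are folds over the parsed pairs
  have hA : deps.foldl (fun d dep =>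
      let p := parseDep dep
      if d.contains p.1 then
        if betterVer (d.getD p.1 none) p.2 then d.insert p.1 p.2 else d
      else d.insert p.1 p.2) PySem.Dict.empty
      = (deps.map parseDep).foldl stepA PySem.Dict.empty := by
    rw [List.foldl_map]; rfl
  have hB : deps.foldl (fun d dep =>
      let p := parseDep dep
      d.modify p.1 [] (fun l => l ++ [p.2])) PySem.Dict.empty
      = (deps.map parseDep).foldl stepB PySem.Dict.empty := by
    rw [List.foldl_map]; rfl
  simp only [hA, hB]
  set pairs := deps.map parseDep with hpairs
  set dA := pairs.foldl stepA PySem.Dict.empty with hdA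
  set dB := pairs.foldl stepB PySem.Dict.empty with hdB
  -- keys coincide
  have hkA : dA.keys = PySem.Set.ofList (pairs.map (·.1)) := by
    rw [hdA, keys_foldA]
    simp [PySem.Dict.keys, PySem.Dict.empty, PySem.Set.update_nil_left]
  have hkB : dB.keys = PySem.Set.ofList (pairs.map (·.1)) := by
    rw [hdB]
    have h2 := PySem.Dict.keys_foldl_modify_key (l := pairs) (key := fun p => p.1)
      (d0 := ([] : List (Option String))) (f := fun _ p => fun l => l ++ [p.2])
      (d := PySem.Dict.empty)
    exact h2.trans (by simp [PySem.Dict.keys, PySem.Dict.empty, PySem.Set.update_nil_left])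
  have hndA : dA.keys.Nodup := by rw [hkA]; exact PySem.Set.nodup_ofList _
  have hndB : dB.keys.Nodup := by rw [hkB]; exact PySem.Set.nodup_ofList _
  -- items as maps over the (equal) key lists
  rw [PySem.Dict.items_eq_map_keys dA hndA none, PySem.Dict.items_eq_map_keys dB hndB []]
  rw [hkA, hkB]
  simp only [List.map_map]
  apply List.map_congr_left
  intro k hk
  -- k occurs among the parsed names, so its version list is nonempty
  have hkmem : k ∈ pairs.map (·.1) := (PySem.Set.mem_ofList _ _).mp hk
  obtain ⟨p0, hp0, hp0k⟩ := List.mem_map.mp hkmem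
  have hfilter : p0 ∈ pairs.filter (fun p => p.1 == k) :=
    List.mem_filter.mpr ⟨hp0, by simp [hp0k]⟩
  -- B's stored list for k
  have hgB : dB.getD k [] = (pairs.filter (fun p => p.1 == k)).map (·.2) := by
    rw [hdB]
    have := PySem.Dict.getD_foldl_modify_append (l := pairs)
      (d := (PySem.Dict.empty : PySem.Dict String (List (Option String)))) (c := k)
    simpa [PySem.Dict.getD_empty, stepB] using this
  -- A's stored value for k
  rcases hvs : (pairs.filter (fun p => p.1 == k)).map (·.2) with _ | ⟨w, ws⟩
  · exact absurd (List.mem_map_of_mem hfilter (f := (·.2))) (by rw [hvs]; simp)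
  · have hgA : dA.getD k none = ws.foldl combineVer w := by
      have h1 := get?_foldA pairs PySem.Dict.empty k
      rw [← hdA, PySem.Dict.get?_empty, hvs] at h1
      simp only [List.foldl_cons] at h1
      rw [foldA_some] at h1
      exact PySem.Dict.getD_of_get?_eq_some dA none h1
    simp only [Function.comp_apply, hgA, hgB, hvs]
    rw [combineVer_charac]
    rcases ht : (w :: ws).flatMap truthy1 with _ | ⟨h, t⟩
    · -- no truthy version: A stored a falsy value, B formats the bare name
      simp only [List.flatMap_cons] at ht
      have hw : truthy1 w = [] := by
        rcases he : truthy1 w with _ | _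
        · rfl
        · rw [he] at ht; simp at ht
      rcases w with _ | s
      · simp [fmtDep, PySem.List.max?]
      · have hs : s = "" := by
          by_contra hs; simp [truthy1, hs] at hw
        simp [fmtDep, hs, PySem.List.max?]
    · -- some truthy version: both sides format name == max
      have hht : h ∈ (w :: ws).flatMap truthy1 := by rw [ht]; exact List.mem_cons_self
      have hhne : h ≠ "" := by
        obtain ⟨v, _, hv⟩ := List.mem_flatMap.mp hht
        rcases v with _ | s
        · simp [truthy1] at hv
        · by_cases hs : s = "" <;> simp [truthy1, hs] at hv
          exact hv ▸ hs
      have hm := foldl_max_ne_empty h t hhne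
      simp only [fmtDep, if_neg hm, PySem.List.max?_id_cons]
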